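-- pv_equiv track=rewrite | github.com/Islam2002-math/rail-fence-site | rail_fence_demo.py | generer_pattern_indices
-- ===== SOURCE A (Python) =====
-- from typing import List
--
-- def generer_pattern_indices(longueur: int, k: int) -> List[int]:
--     """Génère la liste des indices de ligne (0, 1, ..., k-1) pour chaque
--     caractère du texte, en suivant un mouvement en zigzag.
--
--     Exemple pour k = 3 :
--         lignes : 0 -> 1 -> 2 -> 1 -> 0 -> 1 -> 2 -> ...
--
--     Si longueur = 7, on obtient : [0, 1, 2, 1, 0, 1, 2]
--     """
--     if k <= 1:
--         return [0] * longueur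
--
--     indices: List[int] = []
--     ligne = 0          # on commence sur la ligne du haut (0)
--     direction = 1      # 1 = on descend, -1 = on remonte
--
--     for _ in range(longueur):
--         indices.append(ligne)
--
--         if ligne == 0:
--             direction = 1       # en haut -> on repart vers le bas
--         elif ligne == k - 1:
--             direction = -1      # en bas -> on repart vers le haut
--
--         ligne += direction      # on se déplace d'une ligne
--
--     return indices
-- ===== SOURCE B (Python) =====
-- from typing import List
--
-- def generer_pattern_indices(longueur: int, k: int) -> List[int]:
--     if k <= 1:
--         return [0] * longueur
--     p = 2 * (k - 1)
--     return [m if m < k else p - m for m in (i % p for i in range(longueur))]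
-- ===== Notes on version B (the rewrite author's own statement) =====
-- stated objective: idiomatic
-- what changed: Replaces the stateful zigzag walk (current line + direction updated across iterations) by a closed-form row index per position: m = i % (2*(k-1)), giving m on the down-leg and 2*(k-1)-m on the up-leg, built in one comprehension.
import Mathlib
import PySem

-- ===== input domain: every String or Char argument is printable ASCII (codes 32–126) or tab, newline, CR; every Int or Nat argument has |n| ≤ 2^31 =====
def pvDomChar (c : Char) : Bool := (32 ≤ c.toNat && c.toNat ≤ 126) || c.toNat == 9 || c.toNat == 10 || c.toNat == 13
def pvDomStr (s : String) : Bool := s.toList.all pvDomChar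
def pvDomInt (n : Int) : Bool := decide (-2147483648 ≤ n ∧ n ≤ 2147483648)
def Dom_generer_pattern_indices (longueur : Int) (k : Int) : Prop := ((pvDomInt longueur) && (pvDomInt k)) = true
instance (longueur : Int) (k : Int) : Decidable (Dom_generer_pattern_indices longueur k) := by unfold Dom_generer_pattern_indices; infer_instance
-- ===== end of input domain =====

-- B replaces A's stateful zigzag walk (line + direction carried across iterations) by a
-- closed-form row index per position via the zigzag period 2*(k-1); same cost, more idiomatic.

-- ===== PORT A =====
-- the for-loop of A: fuel = remaining iterations, state = (ligne, direction)
def genA (k : Int) : Nat → Int → Int → List Int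
  | 0, _, _ => []
  | n+1, ligne, dir =>
    let dir' := if ligne = 0 then (1:Int) else if ligne = k - 1 then -1 else dir
    ligne :: genA k n (ligne + dir') dir'

def generer_pattern_indices (longueur : Int) (k : Int) : List Int :=
  if k ≤ 1 then List.replicate longueur.toNat 0   -- [0] * longueur (negative → [])
  else genA k longueur.toNat 0 1

-- ===== PORT B =====
def generer_pattern_indices_alt (longueur : Int) (k : Int) : List Int :=
  if k ≤ 1 then List.replicate longueur.toNat 0
  else
    let p := 2 * (k - 1)
    (PySem.List.pyRange 0 longueur 1).map (fun i =>
      let m := PySem.Int.mod i p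
      if m < k then m else p - m)

-- ===== PRECONDITION & SPEC =====
def Spec_generer_pattern_indices (longueur : Int) (k : Int) (out : List Int) : Prop := out = generer_pattern_indices_alt longueur k
instance (longueur : Int) (k : Int) (out : List Int) : Decidable (Spec_generer_pattern_indices longueur k out) := by unfold Spec_generer_pattern_indices; infer_instance

-- ===== CLAIM (what is proved, stated in full; the proofs are below) =====
def Claim_equal_generer_pattern_indices : Prop := ∀ (longueur : Int) (k : Int), Dom_generer_pattern_indices longueur k → Spec_generer_pattern_indices longueur k (generer_pattern_indices longueur k)

-- ===== LEMMAS AND PROOFS =====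

-- closed-form row index at position i (B's formula, over Int.emod)
def zig (k i : Int) : Int :=
  if i % (2*(k-1)) < k then i % (2*(k-1)) else 2*(k-1) - i % (2*(k-1))

-- the direction A uses to move from position i to i+1
def zdir (k i : Int) : Int :=
  if i % (2*(k-1)) < k - 1 then 1 else -1

lemma emod_step (k i : Int) (hk : 2 ≤ k) :
    (i+1) % (2*(k-1)) =
      if i % (2*(k-1)) + 1 = 2*(k-1) then 0 else i % (2*(k-1)) + 1 := by
  have hm0 : 0 ≤ i % (2*(k-1)) := Int.emod_nonneg _ (by omega)
  have hmp : i % (2*(k-1)) < 2*(k-1) := Int.emod_lt_of_pos _ (by omega)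
  rw [Int.add_emod, Int.emod_eq_of_lt (a := 1) (by omega) (by omega)]
  split_ifs with h
  · rw [h, Int.emod_self]
  · exact Int.emod_eq_of_lt (by omega) (by omega)

lemma genA_eq (k : Int) (hk : 2 ≤ k) :
    ∀ (n : Nat) (i ligne dir : Int),
      ligne = zig k i → (ligne ≠ 0 → ligne ≠ k - 1 → dir = zdir k i) →
      genA k n ligne dir = (List.range n).map (fun (j : Nat) => zig k (i + (j:Int))) := by
  intro n
  induction n with
  | zero => intro i ligne dir _ _; simp [genA]
  | succ n ih =>
    intro i ligne dir hl hd
    have hm0 : 0 ≤ i % (2*(k-1)) := Int.emod_nonneg _ (by omega)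
    have hmp : i % (2*(k-1)) < 2*(k-1) := Int.emod_lt_of_pos _ (by omega)
    have hstep := emod_step k i hk
    have hz : zig k i = if i % (2*(k-1)) < k then i % (2*(k-1)) else 2*(k-1) - i % (2*(k-1)) := rfl
    have hz' : zig k (i+1) = if (i+1) % (2*(k-1)) < k then (i+1) % (2*(k-1)) else 2*(k-1) - (i+1) % (2*(k-1)) := rfl
    have hdv : zdir k i = if i % (2*(k-1)) < k - 1 then 1 else -1 := rfl
    have hdv' : zdir k (i+1) = if (i+1) % (2*(k-1)) < k - 1 then 1 else -1 := rfl
    -- the updated direction equals zdir k i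
    have hdir : (if ligne = 0 then (1:Int) else if ligne = k - 1 then -1 else dir) = zdir k i := by
      by_cases h0 : ligne = 0
      · rw [if_pos h0, hdv]
        rw [hz] at hl; rw [h0] at hl
        split_ifs at hl ⊢ <;> omega
      · rw [if_neg h0]
        by_cases h1 : ligne = k - 1
        · rw [if_pos h1, hdv]
          rw [hz] at hl; rw [h1] at hl
          split_ifs at hl ⊢ <;> omega
        · rw [if_neg h1]; exact hd h0 h1
    -- moving by zdir k i lands on zig k (i+1)
    have hmove : zig k i + zdir k i = zig k (i+1) := by
      rw [hz, hz', hdv, hstep]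
      split_ifs <;> omega
    -- zdir is preserved when the new line is strictly inside
    have hkeep : zig k (i+1) ≠ 0 → zig k (i+1) ≠ k - 1 → zdir k i = zdir k (i+1) := by
      intro h1 h2
      rw [hz'] at h1 h2
      rw [hdv, hdv', hstep] at *
      split_ifs at h1 h2 ⊢ <;> omega
    show ligne :: genA k n _ _ = _
    rw [hdir, hl, hmove]
    rw [ih (i+1) (zig k (i+1)) (zdir k i) rfl (fun h1 h2 => hkeep h1 h2)]
    rw [List.range_succ_eq_map, List.map_cons, List.map_map]
    congr 1
    · simp [zig]
    · apply List.map_congr_left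
      intro j _
      show zig k (i + 1 + (j:Int)) = zig k (i + ((j+1 : Nat) : Int))
      push_cast
      ring_nf

-- ===== VERDICT (by name: the statement is the Claim_ definition above) =====
theorem generer_pattern_indices_spec : Claim_equal_generer_pattern_indices := by
  intro longueur k _
  unfold Spec_generer_pattern_indices generer_pattern_indices generer_pattern_indices_alt
  by_cases hk : k ≤ 1
  · rw [if_pos hk, if_pos hk]
  · rw [if_neg hk, if_neg hk]
    have hk2 : 2 ≤ k := by omega
    have h0 : (0:Int) = zig k 0 := by
      simp only [zig, Int.zero_emod]
      rw [if_pos (by omega)]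
    rw [genA_eq k hk2 longueur.toNat 0 0 1 h0 (fun h _ => absurd rfl h)]
    rw [PySem.List.pyRange_one, List.map_map]
    have hlen : (longueur - 0).toNat = longueur.toNat := by omega
    rw [hlen]
    apply List.map_congr_left
    intro j _
    show zig k (0 + (j:Int)) = _
    simp only [zig, PySem.Int.mod_eq_emod_of_pos (b := 2*(k-1)) (by omega)]
    rfl
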